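-- pv_equiv track=rewrite | github.com/ThirdAILabs/ner-backend | plugin/plugin-python/models/ensemble/postprocess/postprocess_rules.py | group_consecutive_indices
-- ===== SOURCE A (Python) =====
-- from typing import List, Tuple
--
-- def group_consecutive_indices(
--     tags: List[str],
--     spans: List[Tuple[int, int]],
--     label: str,
--     is_single_string: bool = False,
-- ) -> List[Tuple[int, int]]:
--     groups: List[Tuple[int, int]] = []
--     i, n = 0, len(tags)
--     while i < n:
--         if tags[i] == label:
--             start = i
--             while (
--                 i + 1 < n
--                 and tags[i + 1] == label
--                 and (
--                     spans[i + 1][0] == spans[i][1] or spans[i + 1][0] == spans[i][1] + 1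
--                 )
--                 and (not is_single_string)
--             ):
--                 i += 1
--             groups.append((start, i))
--         i += 1
--     return groups
-- ===== SOURCE B (Python) =====
-- from typing import List, Tuple
--
-- def group_consecutive_indices(
--     tags: List[str],
--     spans: List[Tuple[int, int]],
--     label: str,
--     is_single_string: bool = False,
-- ) -> List[Tuple[int, int]]:
--     n = len(tags)
--
--     def linked(i: int) -> bool:
--         # true iff position i continues the group of position i-1
--         return (
--             tags[i - 1] == label
--             and not is_single_string
--             and (spans[i][0] == spans[i - 1][1] or spans[i][0] == spans[i - 1][1] + 1)
--         )
--
--     starts = [i for i in range(n) if tags[i] == label and (i == 0 or not linked(i))]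
--     ends = [
--         i
--         for i in range(n)
--         if tags[i] == label
--         and (i == n - 1 or tags[i + 1] != label or not linked(i + 1))
--     ]
--     return list(zip(starts, ends))
-- ===== Notes on version B (the rewrite author's own statement) =====
-- stated objective: alternative
-- what changed: Replaced A's stateful nested while-loops (outer scan plus inner lookahead loop consuming a run) by a stateless staged computation: two independent filter passes that declaratively collect the group-start indices and group-end indices by local boundary tests against the previous/next position, then zip the two lists into the result pairs.
-- crash fix: When is_single_string is true and tags contain an adjacent pair equal to label at a position where spans is too short, A raises IndexError (it evaluates the spans adjacency test before the is_single_string test) while B checks is_single_string first and returns the singleton groups. — e.g. on group_consecutive_indices(["L", "L"], [], "L", true): A raises IndexError, B returns [(0, 0), (1, 1)]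
import Mathlib
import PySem

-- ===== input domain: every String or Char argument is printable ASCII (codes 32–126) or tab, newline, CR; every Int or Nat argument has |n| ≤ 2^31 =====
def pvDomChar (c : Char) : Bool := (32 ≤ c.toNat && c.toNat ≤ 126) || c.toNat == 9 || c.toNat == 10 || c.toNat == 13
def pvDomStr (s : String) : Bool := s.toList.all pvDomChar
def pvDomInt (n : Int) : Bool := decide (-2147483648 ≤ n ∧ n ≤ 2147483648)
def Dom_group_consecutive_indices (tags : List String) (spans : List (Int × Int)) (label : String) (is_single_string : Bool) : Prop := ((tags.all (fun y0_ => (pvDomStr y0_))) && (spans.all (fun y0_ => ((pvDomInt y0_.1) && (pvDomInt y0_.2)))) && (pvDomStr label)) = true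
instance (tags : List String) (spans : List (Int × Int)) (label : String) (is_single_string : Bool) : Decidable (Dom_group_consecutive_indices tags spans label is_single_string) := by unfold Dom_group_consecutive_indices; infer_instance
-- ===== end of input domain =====

-- B replaces A's stateful nested while-loops by a stateless staged computation: two
-- independent filter passes collecting group-start and group-end indices by local
-- boundary tests, then a zip of the two lists; objective: alternative decomposition,
-- same O(n) cost.

-- ===== PORT A =====
-- adjacency test of A's inner while: spans[i+1][0] == spans[i][1] or spans[i+1][0] == spans[i][1]+1
-- (indices are in range under Pre_, so getElem? is exact; out of range Python raises)
def pvAdjA (spans : List (Int × Int)) (i : Nat) : Bool :=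
  match spans[i+1]?, spans[i]? with
  | some a, some b => a.1 == b.2 || a.1 == b.2 + 1
  | _, _ => false

-- A's inner while: advance i while the run continues
def pvA_inner (tags : List String) (spans : List (Int × Int)) (label : String)
    (iss : Bool) (n i : Nat) : Nat :=
  if h : i + 1 < n ∧ tags.getD (i+1) "" = label ∧ pvAdjA spans i = true ∧ iss = false then
    pvA_inner tags spans label iss n (i+1)
  else i
termination_by n - i
decreasing_by omega

theorem pvA_inner_ge (tags : List String) (spans : List (Int × Int)) (label : String)
    (iss : Bool) (n : Nat) : ∀ i, i ≤ pvA_inner tags spans label iss n i := by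
  intro i
  fun_induction pvA_inner <;> omega

-- A's outer while over i
def pvA_outer (tags : List String) (spans : List (Int × Int)) (label : String)
    (iss : Bool) (n i : Nat) (acc : List (Int × Int)) : List (Int × Int) :=
  if h : i < n then
    if tags.getD i "" = label then
      pvA_outer tags spans label iss n (pvA_inner tags spans label iss n i + 1)
        (acc ++ [((i : Int), (pvA_inner tags spans label iss n i : Int))])
    else pvA_outer tags spans label iss n (i+1) acc
  else acc
termination_by n - i
decreasing_by
  · have := pvA_inner_ge tags spans label iss n i; omega
  · omega

def group_consecutive_indices (tags : List String) (spans : List (Int × Int))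
    (label : String) (is_single_string : Bool) : List (Int × Int) :=
  pvA_outer tags spans label is_single_string tags.length 0 []

-- ===== PORT B =====
-- B's adjacency test: spans[i][0] == spans[i-1][1] or spans[i][0] == spans[i-1][1]+1
def pvAdjB (spans : List (Int × Int)) (i : Nat) : Bool :=
  match spans[i]?, spans[i-1]? with
  | some a, some b => a.1 == b.2 || a.1 == b.2 + 1
  | _, _ => false

-- B's helper linked(i): position i continues the group of position i-1
def pvLink (tags : List String) (spans : List (Int × Int)) (label : String)
    (iss : Bool) (i : Nat) : Bool :=
  tags.getD (i-1) "" == label && !iss && pvAdjB spans i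

-- the two comprehension predicates of B
def pvIsStart (tags : List String) (spans : List (Int × Int)) (label : String)
    (iss : Bool) (i : Nat) : Bool :=
  tags.getD i "" == label && (i == 0 || !pvLink tags spans label iss i)

def pvIsEnd (tags : List String) (spans : List (Int × Int)) (label : String)
    (iss : Bool) (n i : Nat) : Bool :=
  tags.getD i "" == label &&
    (i == n - 1 || tags.getD (i+1) "" != label || !pvLink tags spans label iss (i+1))

-- B: filter the start indices, filter the end indices, zip them
def group_consecutive_indices_alt (tags : List String) (spans : List (Int × Int))
    (label : String) (is_single_string : Bool) : List (Int × Int) :=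
  let n := tags.length
  let starts := (List.range n).filter (pvIsStart tags spans label is_single_string)
  let ends := (List.range n).filter (pvIsEnd tags spans label is_single_string n)
  (starts.zip ends).map (fun p => ((p.1 : Int), (p.2 : Int)))

-- ===== PRECONDITION & SPEC =====
-- Pre_ excludes exactly the inputs on which Python A raises IndexError: some adjacent pair of
-- label-tagged positions whose spans index i+1 is out of range (A evaluates the spans test
-- before the is_single_string test, so it is reached regardless of that flag).
def Pre_group_consecutive_indices (tags : List String) (spans : List (Int × Int)) (label : String) (is_single_string : Bool) : Prop :=
  ∀ i ∈ List.range tags.length,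
    i + 1 < tags.length → tags.getD i "" = label → tags.getD (i+1) "" = label →
      i + 1 < spans.length
instance (tags : List String) (spans : List (Int × Int)) (label : String) (is_single_string : Bool) : Decidable (Pre_group_consecutive_indices tags spans label is_single_string) := by unfold Pre_group_consecutive_indices; infer_instance

def pvWitness_group_consecutive_indices : List String × (List (Int × Int)) × String × Bool :=
  (["PER", "PER", "O"], [(0, 3), (4, 7), (8, 9)], "PER", false)

-- A raises IndexError (spans too short for an adjacent pair of label tags) while B, which
-- checks is_single_string before the adjacency test, returns the singleton groups.
def Raises_group_consecutive_indices (tags : List String) (spans : List (Int × Int)) (label : String) (is_single_string : Bool) : Prop :=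
  is_single_string = true ∧
  ∃ i ∈ List.range tags.length,
    i + 1 < tags.length ∧ tags.getD i "" = label ∧ tags.getD (i+1) "" = label ∧
      ¬ (i + 1 < spans.length)
instance (tags : List String) (spans : List (Int × Int)) (label : String) (is_single_string : Bool) : Decidable (Raises_group_consecutive_indices tags spans label is_single_string) := by unfold Raises_group_consecutive_indices; infer_instance

def pvRaiseWitness_group_consecutive_indices : List String × (List (Int × Int)) × String × Bool :=
  (["L", "L"], [], "L", true)
def pvRaiseWitnessOut_group_consecutive_indices : List (Int × Int) := [(0, 0), (1, 1)]

def Spec_group_consecutive_indices (tags : List String) (spans : List (Int × Int)) (label : String) (is_single_string : Bool) (out : List (Int × Int)) : Prop := out = group_consecutive_indices_alt tags spans label is_single_string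
instance (tags : List String) (spans : List (Int × Int)) (label : String) (is_single_string : Bool) (out : List (Int × Int)) : Decidable (Spec_group_consecutive_indices tags spans label is_single_string out) := by unfold Spec_group_consecutive_indices; infer_instance

-- ===== CLAIM (what is proved, stated in full; the proofs are below) =====
def Claim_equal_group_consecutive_indices : Prop := ∀ (tags : List String) (spans : List (Int × Int)) (label : String) (is_single_string : Bool), Dom_group_consecutive_indices tags spans label is_single_string → Pre_group_consecutive_indices tags spans label is_single_string → Spec_group_consecutive_indices tags spans label is_single_string (group_consecutive_indices tags spans label is_single_string)

def Claim_raises_group_consecutive_indices : Prop := (∀ (tags : List String) (spans : List (Int × Int)) (label : String) (is_single_string : Bool), Dom_group_consecutive_indices tags spans label is_single_string → Raises_group_consecutive_indices tags spans label is_single_string → ¬ Pre_group_consecutive_indices tags spans label is_single_string) ∧ (Dom_group_consecutive_indices (pvRaiseWitness_group_consecutive_indices.1) (pvRaiseWitness_group_consecutive_indices.2.1) (pvRaiseWitness_group_consecutive_indices.2.2.1) (pvRaiseWitness_group_consecutive_indices.2.2.2) ∧ Raises_group_consecutive_indices (pvRaiseWitness_group_consecutive_indices.1) (pvRaiseWitness_group_consecutive_indices.2.1)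 (pvRaiseWitness_group_consecutive_indices.2.2.1) (pvRaiseWitness_group_consecutive_indices.2.2.2) ∧ group_consecutive_indices_alt (pvRaiseWitness_group_consecutive_indices.1) (pvRaiseWitness_group_consecutive_indices.2.1) (pvRaiseWitness_group_consecutive_indices.2.2.1) (pvRaiseWitness_group_consecutive_indices.2.2.2) = pvRaiseWitnessOut_group_consecutive_indices)

-- ===== LEMMAS AND PROOFS =====

-- B's adjacency at i+1 is A's adjacency at i
theorem pvAdjB_succ (spans : List (Int × Int)) (i : Nat) :
    pvAdjB spans (i+1) = pvAdjA spans i := by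
  simp [pvAdjA, pvAdjB]

-- the remaining range splits off its head while i < n
theorem pvRange'_cons (i n : Nat) (h : i < n) :
    List.range' i (n - i) = i :: List.range' (i+1) (n - (i+1)) := by
  rw [show n - i = (n - (i+1)) + 1 by omega, List.range'_succ]

-- the stopping condition of A's inner while holds at its result
theorem pvA_inner_stop (tags : List String) (spans : List (Int × Int)) (label : String)
    (iss : Bool) (n : Nat) : ∀ i,
    ¬ (pvA_inner tags spans label iss n i + 1 < n ∧
       tags.getD (pvA_inner tags spans label iss n i + 1) "" = label ∧
       pvAdjA spans (pvA_inner tags spans label iss n i) = true ∧ iss = false) := by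
  intro i
  fun_induction pvA_inner with
  | case1 i h ih => exact ih
  | case2 i h => exact h

-- Run lemma: along A's inner run from i to J = pvA_inner i, B finds no further start
-- and exactly one end, at J.
theorem pvB_run (tags : List String) (spans : List (Int × Int)) (label : String)
    (iss : Bool) (n : Nat) :
    ∀ k i, n - i ≤ k → i < n → tags.getD i "" = label →
      ((List.range' (i+1) (n-(i+1))).filter (pvIsStart tags spans label iss) =
        (List.range' (pvA_inner tags spans label iss n i + 1)
          (n - (pvA_inner tags spans label iss n i + 1))).filter
          (pvIsStart tags spans label iss)) ∧
      ((List.range' i (n-i)).filter (pvIsEnd tags spans label iss n) =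
        pvA_inner tags spans label iss n i ::
        (List.range' (pvA_inner tags spans label iss n i + 1)
          (n - (pvA_inner tags spans label iss n i + 1))).filter
          (pvIsEnd tags spans label iss n)) := by
  intro k
  induction k with
  | zero => intro i hk hi _; omega
  | succ k ih =>
    intro i hk hi hl
    simp only [List.getD_eq_getElem?_getD] at hl
    by_cases hc : i + 1 < n ∧ tags.getD (i+1) "" = label ∧ pvAdjA spans i = true ∧ iss = false
    · -- run continues
      have hJ : pvA_inner tags spans label iss n i = pvA_inner tags spans label iss n (i+1) := by
        rw [pvA_inner, dif_pos hc]
      obtain ⟨h1, h2, h3, h4⟩ := hc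
      simp only [List.getD_eq_getElem?_getD] at h2
      have hlink : pvLink tags spans label iss (i+1) = true := by
        simp [pvLink, pvAdjB_succ, hl, h4, h3]
      have ihr := ih (i+1) (by omega) h1 h2
      constructor
      · rw [pvRange'_cons (i+1) n h1, List.filter_cons_of_neg
          (by simp [pvIsStart, hlink]), hJ]
        exact ihr.1
      · rw [pvRange'_cons i n hi, List.filter_cons_of_neg
          (by simp [pvIsEnd, hlink, h2]; omega), hJ]
        exact ihr.2
    · -- run stops at i
      have hJ : pvA_inner tags spans label iss n i = i := by
        rw [pvA_inner, dif_neg hc]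
      have hend : pvIsEnd tags spans label iss n i = true := by
        by_cases h1 : i + 1 < n
        · by_cases h2 : tags.getD (i+1) "" = label
          · have h3 : ¬ (pvAdjA spans i = true ∧ iss = false) := fun h => hc ⟨h1, h2, h⟩
            simp only [List.getD_eq_getElem?_getD] at h2
            cases hiss : iss <;>
              cases hadj : pvAdjA spans i <;>
              simp_all [pvIsEnd, pvLink, pvAdjB_succ]
          · simp only [List.getD_eq_getElem?_getD] at h2
            simp [pvIsEnd, hl, h2]
        · have h0 : i = n - 1 := by omega
          simp [pvIsEnd, h0]
          exact h0 ▸ hl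
      refine ⟨by rw [hJ], ?_⟩
      rw [pvRange'_cons i n hi, List.filter_cons_of_pos hend, hJ]

-- Main correspondence: A's outer loop equals B's filtered-zip over the remaining range.
theorem pvAB_loop (tags : List String) (spans : List (Int × Int)) (label : String)
    (iss : Bool) (n : Nat) :
    ∀ k i acc, n - i ≤ k →
      (i < n → tags.getD i "" = label → pvIsStart tags spans label iss i = true) →
      pvA_outer tags spans label iss n i acc =
      acc ++ (((List.range' i (n-i)).filter (pvIsStart tags spans label iss)).zip
              ((List.range' i (n-i)).filter (pvIsEnd tags spans label iss n))).map
              (fun p => ((p.1 : Int), (p.2 : Int))) := by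
  intro k
  induction k with
  | zero =>
    intro i acc hk _
    rw [pvA_outer, dif_neg (show ¬ i < n by omega),
      show n - i = 0 by omega, List.range'_zero]
    simp
  | succ k ih =>
    intro i acc hk hinv
    rw [pvA_outer]
    by_cases hi : i < n
    · rw [dif_pos hi]
      by_cases hl : tags.getD i "" = label
      · rw [if_pos hl]
        have hstart := hinv hi hl
        have hrun := pvB_run tags spans label iss n (n - i) i (le_refl _) hi hl
        have hge := pvA_inner_ge tags spans label iss n i
        have hstop := pvA_inner_stop tags spans label iss n i
        rw [pvRange'_cons i n hi, List.filter_cons_of_pos hstart, hrun.1,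
          (by rw [pvRange'_cons i n hi] at hrun; exact hrun.2 :
            (i :: List.range' (i+1) (n-(i+1))).filter (pvIsEnd tags spans label iss n) =
            pvA_inner tags spans label iss n i ::
            (List.range' (pvA_inner tags spans label iss n i + 1)
              (n - (pvA_inner tags spans label iss n i + 1))).filter
              (pvIsEnd tags spans label iss n))]
        rw [List.zip_cons_cons, List.map_cons]
        rw [ih (pvA_inner tags spans label iss n i + 1)
              (acc ++ [((i : Int), (pvA_inner tags spans label iss n i : Int))])
              (by omega)
              (by
                intro hJn hJl
                have hnolink : pvLink tags spans label iss
                    (pvA_inner tags spans label iss n i + 1) = false := by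
                  have h3 : ¬ (pvAdjA spans (pvA_inner tags spans label iss n i) = true ∧
                      iss = false) := fun h => hstop ⟨hJn, hJl, h⟩
                  cases hiss : iss <;>
                    cases hadj : pvAdjA spans (pvA_inner tags spans label iss n i) <;>
                    simp_all [pvLink, pvAdjB_succ]
                simp only [List.getD_eq_getElem?_getD] at hJl
                simp [pvIsStart, hJl, hnolink])]
        simp
      · rw [if_neg hl]
        simp only [List.getD_eq_getElem?_getD] at hl
        have hskipS : pvIsStart tags spans label iss i = false := by simp [pvIsStart, hl]
        have hskipE : pvIsEnd tags spans label iss n i = false := by simp [pvIsEnd, hl]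
        rw [pvRange'_cons i n hi, List.filter_cons_of_neg (by simp [hskipS]),
          List.filter_cons_of_neg (by simp [hskipE])]
        exact ih (i+1) acc (by omega)
          (by
            intro h1 h2
            simp only [List.getD_eq_getElem?_getD] at h2
            have : pvLink tags spans label iss (i+1) = false := by
              simp [pvLink, List.getD_eq_getElem?_getD, hl]
            simp [pvIsStart, h2, this])
    · rw [dif_neg hi, show n - i = 0 by omega, List.range'_zero]; simp

-- ===== VERDICT (by name: the statement is the Claim_ definition above) =====
theorem group_consecutive_indices_spec : Claim_equal_group_consecutive_indices := by
  intro tags spans label iss _ _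
  unfold Spec_group_consecutive_indices group_consecutive_indices group_consecutive_indices_alt
  rw [pvAB_loop tags spans label iss tags.length tags.length 0 [] (by omega)
    (by
      intro _ h
      simp only [List.getD_eq_getElem?_getD] at h
      simp [pvIsStart, h])]
  simp [List.range_eq_range']

@[simp] theorem group_consecutive_indices_raises : Claim_raises_group_consecutive_indices := by
  unfold Claim_raises_group_consecutive_indices
  refine ⟨?_, by decide⟩
  intro tags spans label iss _ hr hpre
  obtain ⟨_, i, hmem, h1, h2, h3, h4⟩ := hr
  exact h4 (hpre i hmem h1 h2 h3)
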